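-- pv_equiv track=rewrite | github.com/betcherj/AOC | pythonProject/day_seven/part_one.py | can_evaluate
-- ===== SOURCE A (Python) =====
-- def can_evaluate(target, nums):
--     if len(nums) == 1:
--         return True if nums[0] == target else False
--     elif nums[0] > target:
--         return False
--     mul_nums = [nums[0] * nums[1]] + nums[2:]
--     add_nums = [nums[0] + nums[1]] + nums[2:]
--     return can_evaluate(target, mul_nums) or can_evaluate(target, add_nums)
-- ===== SOURCE B (Python) =====
-- def can_evaluate(target, nums):
--     # Iterative pass over the set of reachable prefix values instead of A's branching recursion.
--     possible = {nums[0]}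
--     for x in nums[1:]:
--         survivors = [p for p in possible if p <= target]
--         possible = {p * x for p in survivors} | {p + x for p in survivors}
--     return target in possible
-- ===== Notes on version B (the rewrite author's own statement) =====
-- stated objective: alternative
-- what changed: Replaces A's branching recursion (try * and + at every position) with a single left-to-right pass maintaining the set of reachable prefix values, pruning values above target before each combine exactly where A prunes; same worst-case cost (the reachable set can still grow exponentially), but duplicates of equal prefix values are merged.
import Mathlib
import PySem

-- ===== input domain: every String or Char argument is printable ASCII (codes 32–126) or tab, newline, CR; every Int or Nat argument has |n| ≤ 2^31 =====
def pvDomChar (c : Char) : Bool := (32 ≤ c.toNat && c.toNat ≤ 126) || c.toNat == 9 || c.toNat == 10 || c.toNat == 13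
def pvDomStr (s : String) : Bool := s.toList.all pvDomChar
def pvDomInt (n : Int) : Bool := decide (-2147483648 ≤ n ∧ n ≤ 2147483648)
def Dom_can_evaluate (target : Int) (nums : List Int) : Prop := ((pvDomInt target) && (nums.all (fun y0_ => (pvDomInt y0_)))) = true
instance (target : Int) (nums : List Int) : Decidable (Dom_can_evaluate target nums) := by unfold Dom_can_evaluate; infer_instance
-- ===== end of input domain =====

-- B replaces A's two-way branching recursion by one pass maintaining the set of
-- reachable prefix values (an alternative decomposition; same worst-case cost).

-- ===== PORT A =====
def can_evaluate (target : Int) (nums : List Int) : Bool :=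
  match nums with
  | [] => false  -- unreachable under Pre_ (Python raises IndexError on [])
  | [a] => a == target
  | a :: b :: rest =>
    if a > target then false
    else can_evaluate target (a * b :: rest) || can_evaluate target ((a + b) :: rest)
termination_by nums.length
decreasing_by all_goals simp

-- ===== PORT B =====
def pvStep (target : Int) (S : PySem.Set Int) (x : Int) : PySem.Set Int :=
  let survivors := S.filter (fun p => decide (p ≤ target))
  PySem.Set.union (PySem.Set.ofList (survivors.map (fun p => p * x)))
    (survivors.map (fun p => p + x))

def can_evaluate_alt (target : Int) (nums : List Int) : Bool :=
  match nums with
  | [] => false  -- unreachable under Pre_ (Python raises IndexError on [])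
  | h :: rest => PySem.Set.contains (rest.foldl (pvStep target) (PySem.Set.ofList [h])) target

-- ===== PRECONDITION & SPEC =====
-- Pre_ excludes only the empty list, on which Python A (and B) raise IndexError.
def Pre_can_evaluate (target : Int) (nums : List Int) : Prop := nums ≠ []
instance (target : Int) (nums : List Int) : Decidable (Pre_can_evaluate target nums) := by unfold Pre_can_evaluate; infer_instance
def pvWitness_can_evaluate : Int × List Int := (6, [2, 3])

def Spec_can_evaluate (target : Int) (nums : List Int) (out : Bool) : Prop := out = can_evaluate_alt target nums
instance (target : Int) (nums : List Int) (out : Bool) : Decidable (Spec_can_evaluate target nums out) := by unfold Spec_can_evaluate; infer_instance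

-- ===== CLAIM (what is proved, stated in full; the proofs are below) =====
def Claim_equal_can_evaluate : Prop := ∀ (target : Int) (nums : List Int), Dom_can_evaluate target nums → Pre_can_evaluate target nums → Spec_can_evaluate target nums (can_evaluate target nums)

-- ===== LEMMAS AND PROOFS =====

-- The fold over `rest` reaches `target` from some value of S iff A's recursion
-- succeeds from some v ∈ S with the remaining numbers.
lemma pvLoop_mem (target : Int) (rest : List Int) :
    ∀ (S : PySem.Set Int),
      (target ∈ rest.foldl (pvStep target) S) ↔ ∃ v ∈ S, can_evaluate target (v :: rest) = true := by
  induction rest with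
  | nil =>
    intro S
    simp [can_evaluate]
  | cons x rs ih =>
    intro S
    rw [List.foldl_cons, ih]
    constructor
    · rintro ⟨w, hw, hA⟩
      simp only [pvStep, PySem.Set.mem_union, PySem.Set.mem_ofList, List.mem_map,
        List.mem_filter, decide_eq_true_eq] at hw
      rcases hw with ⟨p, ⟨hp, hple⟩, rfl⟩ | ⟨p, ⟨hp, hple⟩, rfl⟩
      · exact ⟨p, hp, by simp [can_evaluate, not_lt.mpr hple, hA]⟩
      · exact ⟨p, hp, by simp [can_evaluate, not_lt.mpr hple, hA]⟩
    · rintro ⟨v, hv, hA⟩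
      rw [can_evaluate] at hA
      by_cases hgt : v > target
      · simp [hgt] at hA
      · simp only [hgt, if_false, Bool.or_eq_true] at hA
        have hmem : ∀ w, (w = v * x ∨ w = v + x) → w ∈ pvStep target S x := by
          intro w hw
          simp only [pvStep, PySem.Set.mem_union, PySem.Set.mem_ofList, List.mem_map,
            List.mem_filter, decide_eq_true_eq]
          rcases hw with rfl | rfl
          · exact Or.inl ⟨v, ⟨hv, not_lt.mp hgt⟩, rfl⟩
          · exact Or.inr ⟨v, ⟨hv, not_lt.mp hgt⟩, rfl⟩
        rcases hA with hA | hA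
        · exact ⟨v * x, hmem _ (Or.inl rfl), hA⟩
        · exact ⟨v + x, hmem _ (Or.inr rfl), hA⟩

-- ===== VERDICT (by name: the statement is the Claim_ definition above) =====
theorem can_evaluate_spec : Claim_equal_can_evaluate := by
  intro target nums _ hpre
  unfold Spec_can_evaluate
  match nums with
  | [] => exact absurd rfl hpre
  | h :: rest =>
    have := pvLoop_mem target rest (PySem.Set.ofList [h])
    simp only [PySem.Set.mem_ofList, List.mem_singleton] at this
    rw [can_evaluate_alt]
    rcases hb : can_evaluate target (h :: rest) with _ | _
    · symm
      rw [← Bool.not_eq_true, PySem.Set.contains_iff, this]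
      rintro ⟨v, rfl, hA⟩
      exact absurd hA (by simp [hb])
    · symm
      rw [PySem.Set.contains_iff, this]
      exact ⟨h, rfl, hb⟩
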